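-- pv_equiv track=rewrite | github.com/cYKatherine/Monash-IntelligentSystem | solvepuzzle.py | check_puzzle_solved
-- ===== SOURCE A (Python) =====
-- def check_puzzle_solved(expanded_node_puzzle):
--     """
--     This function is to determine whether the white tiles are all to
--     the left of black tiles.
--     """
--     white_count = expanded_node_puzzle.count("W")
--     white_found = 0
--     for i in range(len(expanded_node_puzzle)):
--         if expanded_node_puzzle[i] == "E":
--             continue
--         if expanded_node_puzzle[i] == "B":
--             if white_found == white_count:
--                 return True
--             else:
--                 return False
--         if expanded_node_puzzle[i] == "W":
--             white_found += 1
-- ===== SOURCE B (Python) =====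
-- def check_puzzle_solved(expanded_node_puzzle):
--     seen_black = False
--     for ch in expanded_node_puzzle:
--         if ch == "B":
--             seen_black = True
--         elif ch == "W" and seen_black:
--             return False
--     if seen_black:
--         return True
-- ===== Notes on version B (the rewrite author's own statement) =====
-- stated objective: simpler
-- what changed: Replaced the precount-all-whites-then-compare-at-first-black strategy with a single pass that keeps only a seen_black flag and fails on the first white found after a black; no precount and no count comparison.
import Mathlib
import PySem

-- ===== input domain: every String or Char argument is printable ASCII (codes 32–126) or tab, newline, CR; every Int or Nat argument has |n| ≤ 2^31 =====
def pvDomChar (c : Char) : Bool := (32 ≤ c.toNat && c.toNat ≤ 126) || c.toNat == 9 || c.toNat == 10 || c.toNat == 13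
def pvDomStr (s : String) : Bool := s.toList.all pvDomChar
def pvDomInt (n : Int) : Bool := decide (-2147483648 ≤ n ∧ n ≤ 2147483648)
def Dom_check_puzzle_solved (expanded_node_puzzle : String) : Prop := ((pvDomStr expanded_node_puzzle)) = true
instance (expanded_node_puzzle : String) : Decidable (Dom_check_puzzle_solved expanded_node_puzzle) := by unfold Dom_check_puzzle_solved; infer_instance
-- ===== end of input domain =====

-- B replaces A's precount-whites-then-compare-at-first-black with a one-pass seen-black flag scan (simpler; same behaviour, both return None when there is no 'B').

-- ===== PORT A =====
-- the for-loop of A, recursing over the remaining characters with the same state (white_count, white_found)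
def checkA_loop (cs : List Char) (white_count white_found : Int) : Option Bool :=
  match cs with
  | [] => none
  | c :: rest =>
    if c = 'E' then checkA_loop rest white_count white_found
    else if c = 'B' then (if white_found = white_count then some true else some false)
    else if c = 'W' then checkA_loop rest white_count (white_found + 1)
    else checkA_loop rest white_count white_found

def check_puzzle_solved (expanded_node_puzzle : String) : Option Bool :=
  checkA_loop expanded_node_puzzle.toList
    ((PySem.Str.count expanded_node_puzzle "W" : Nat) : Int) 0

-- ===== PORT B =====
-- Source B's loop: a single pass keeping only the seen_black flag
def checkB_loop (cs : List Char) (seen_black : Bool) : Option Bool :=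
  match cs with
  | [] => if seen_black then some true else none
  | c :: rest =>
    if c = 'B' then checkB_loop rest true
    else if (c = 'W' : Bool) && seen_black then some false
    else checkB_loop rest seen_black

def check_puzzle_solved_alt (expanded_node_puzzle : String) : Option Bool :=
  checkB_loop expanded_node_puzzle.toList false

-- ===== PRECONDITION & SPEC =====
def Spec_check_puzzle_solved (expanded_node_puzzle : String) (out : Option Bool) : Prop := out = check_puzzle_solved_alt expanded_node_puzzle
instance (expanded_node_puzzle : String) (out : Option Bool) : Decidable (Spec_check_puzzle_solved expanded_node_puzzle out) := by unfold Spec_check_puzzle_solved; infer_instance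

-- ===== CLAIM (what is proved, stated in full; the proofs are below) =====
def Claim_equal_check_puzzle_solved : Prop := ∀ (expanded_node_puzzle : String), Dom_check_puzzle_solved expanded_node_puzzle → Spec_check_puzzle_solved expanded_node_puzzle (check_puzzle_solved expanded_node_puzzle)

-- ===== LEMMAS AND PROOFS =====

-- Python's str.count with a one-character pattern is the character count
theorem count_go_singleton (c : Char) :
    ∀ (fuel : Nat) (cs : List Char) (acc : Nat), cs.length ≤ fuel →
      PySem.Chars.count.go [c] fuel cs acc = acc + cs.count c := by
  intro fuel
  induction fuel with
  | zero =>
    intro cs acc h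
    cases cs with
    | nil => simp [PySem.Chars.count.go]
    | cons x t => simp at h
  | succ n ih =>
    intro cs acc h
    cases cs with
    | nil => simp [PySem.Chars.count.go]
    | cons x t =>
      simp only [List.length_cons, Nat.succ_le_succ_iff] at h
      by_cases hx : x = c
      · subst hx
        have hpre : [x].isPrefixOf (x :: t) = true := by
          simp [List.isPrefixOf]
        simp [PySem.Chars.count.go, hpre, ih t (acc + 1) h]
        omega
      · have hpre : [c].isPrefixOf (x :: t) = false := by
          simp [List.isPrefixOf]; exact fun h' => (hx h'.symm).elim
        simp [PySem.Chars.count.go, hpre, ih t acc h, hx]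

theorem count_W (s : String) :
    PySem.Str.count s "W" = s.toList.count 'W' := by
  rw [PySem.Str.count_eq]
  show PySem.Chars.count s.toList ['W'] = _
  unfold PySem.Chars.count
  simp only [List.isEmpty_cons, Bool.false_eq_true, if_false]
  rw [count_go_singleton 'W' s.toList.length s.toList 0 le_rfl]
  simp

-- once seen_black is true, B returns whether any 'W' remains
theorem checkB_loop_true (cs : List Char) :
    checkB_loop cs true = some (!cs.contains 'W') := by
  induction cs with
  | nil => simp [checkB_loop]
  | cons x t ih =>
    by_cases hB : x = 'B'
    · simp [checkB_loop, hB, ih]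
    · by_cases hW : x = 'W'
      · simp [checkB_loop, hW]
      · simp [checkB_loop, hB, hW, ih]
        exact fun _ h' => hW h'.symm

-- loop invariant: A's white_count equals white_found plus the whites still ahead
theorem loop_eq (cs : List Char) :
    ∀ (wf : Int), checkA_loop cs (wf + (cs.count 'W' : Int)) wf = checkB_loop cs false := by
  induction cs with
  | nil => intro wf; simp [checkA_loop, checkB_loop]
  | cons x t ih =>
    intro wf
    by_cases hE : x = 'E'
    · have hB : x ≠ 'B' := by simp [hE]
      have hW : x ≠ 'W' := by simp [hE]
      simp [checkA_loop, checkB_loop, hE, ih]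
    · by_cases hB : x = 'B'
      · have hW : x ≠ 'W' := by simp [hB]
        have hone : checkB_loop (x :: t) false = some (!t.contains 'W') := by
          simp [checkB_loop, hB, checkB_loop_true]
        rw [hone]
        simp only [checkA_loop, hB, if_true]
        by_cases hz : t.count 'W' = 0
        · have hnm : 'W' ∉ t := by simpa using List.count_eq_zero.mp hz
          simp [hz, hnm]
        · have hmem : 'W' ∈ t := List.count_pos_iff.mp (Nat.pos_of_ne_zero hz)
          have hne : wf ≠ wf + (t.count 'W' : Int) := by
            intro h; omega
          simp [hne, hmem]
      · by_cases hW : x = 'W'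
        · subst hW
          have hcnt : List.count 'W' ('W' :: t) = List.count 'W' t + 1 := by simp
          have harg : wf + (List.count 'W' ('W' :: t) : Int)
              = (wf + 1) + (List.count 'W' t : Int) := by
            rw [hcnt]; push_cast; ring
          calc checkA_loop ('W' :: t) (wf + (List.count 'W' ('W' :: t) : Int)) wf
              = checkA_loop t ((wf + 1) + (List.count 'W' t : Int)) (wf + 1) := by
                rw [harg]; simp [checkA_loop]
            _ = checkB_loop t false := ih (wf + 1)
            _ = checkB_loop ('W' :: t) false := by simp [checkB_loop]
        · simp [checkA_loop, checkB_loop, hE, hB, hW, ih]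

-- ===== VERDICT (by name: the statement is the Claim_ definition above) =====
theorem check_puzzle_solved_spec : Claim_equal_check_puzzle_solved := by
  intro s _
  unfold Spec_check_puzzle_solved check_puzzle_solved check_puzzle_solved_alt
  rw [count_W]
  simpa using loop_eq s.toList 0
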